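-- pv_equiv track=rewrite | github.com/bapca0109/roller-calculator | backend/roller_standards.py | get_belt_widths_for_length
-- ===== SOURCE A (Python) =====
-- ROLLER_LENGTHS = {
--     500: [200],
--     650: [250],
--     800: [315],
--     1000: [380],
--     1200: [465],
--     1400: [530],
--     1600: [600],
--     1800: [670],
--     2000: [750]
-- }
--
-- RETURN_ROLLER_LENGTHS = {
--     500: [600, 250],     # Single: 600mm, 2-piece: 250mm each
--     650: [750, 380],     # Single: 750mm, 2-piece: 380mm each
--     800: [950, 465],     # Single: 950mm, 2-piece: 465mm each
--     1000: [1150, 600],   # Single: 1150mm, 2-piece: 600mm each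
--     1200: [1400, 700],   # Single: 1400mm, 2-piece: 700mm each
--     1400: [1600, 800],   # Single: 1600mm, 2-piece: 800mm each
--     1600: [1800, 900],   # Single: 1800mm, 2-piece: 900mm each
--     1800: [2000, 1000],  # Single: 2000mm, 2-piece: 1000mm each
--     2000: [2200, 1100]   # Single: 2200mm, 2-piece: 1100mm each
-- }
--
-- def get_belt_widths_for_length(roller_length, roller_type="carrying"):
--     """
--     Get belt width(s) that correspond to a roller length
--     Returns list of belt widths (mm)
--     """
--     belt_widths = []
--
--     if roller_type == "return":
--         lengths_map = RETURN_ROLLER_LENGTHS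
--     else:
--         lengths_map = ROLLER_LENGTHS
--
--     for belt_width, lengths in lengths_map.items():
--         if roller_length in lengths:
--             belt_widths.append(belt_width)
--
--     return belt_widths
-- ===== SOURCE B (Python) =====
-- # Reverse lookup tables (length -> belt widths), written out once; a call is a
-- # single dict lookup instead of a scan over every (belt_width, lengths) entry.
-- # Entries appear in the order A's scan would append them, so output order matches.
--
-- _REV_CARRYING = {
--     200: [500],
--     250: [650],
--     315: [800],
--     380: [1000],
--     465: [1200],
--     530: [1400],
--     600: [1600],
--     670: [1800],
--     750: [2000],
-- }
--
-- _REV_RETURN = {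
--     600: [500, 1000],
--     250: [500],
--     750: [650],
--     380: [650],
--     950: [800],
--     465: [800],
--     1150: [1000],
--     1400: [1200],
--     700: [1200],
--     1600: [1400],
--     800: [1400],
--     1800: [1600],
--     900: [1600],
--     2000: [1800],
--     1000: [1800],
--     2200: [2000],
--     1100: [2000],
-- }
--
--
-- def get_belt_widths_for_length(roller_length, roller_type="carrying"):
--     index = _REV_RETURN if roller_type == "return" else _REV_CARRYING
--     return list(index.get(roller_length, []))
-- ===== Notes on version B (the rewrite author's own statement) =====
-- stated objective: faster
-- what changed: Replaces A's per-call scan over every (belt_width, lengths) entry by precomputed reverse lookup tables (length -> list of belt widths), so each call is a single dict lookup returning a copy of the stored list.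
import Mathlib
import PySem

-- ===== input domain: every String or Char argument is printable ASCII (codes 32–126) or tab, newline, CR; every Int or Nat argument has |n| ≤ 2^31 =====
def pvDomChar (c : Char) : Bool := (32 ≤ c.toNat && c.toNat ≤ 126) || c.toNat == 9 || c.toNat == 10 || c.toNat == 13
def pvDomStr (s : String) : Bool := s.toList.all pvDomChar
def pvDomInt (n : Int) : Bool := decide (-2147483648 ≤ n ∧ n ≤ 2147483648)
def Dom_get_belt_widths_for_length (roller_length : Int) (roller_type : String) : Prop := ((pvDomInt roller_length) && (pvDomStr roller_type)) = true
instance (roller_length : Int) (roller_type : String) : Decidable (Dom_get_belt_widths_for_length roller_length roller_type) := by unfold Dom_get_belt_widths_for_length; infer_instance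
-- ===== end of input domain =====

-- B replaces A's per-call scan over all table entries by precomputed reverse
-- lookup tables (length -> belt widths): a call is a single dict lookup
-- returning a copy of the stored list (objective: faster, constant-factor).

-- ===== PORT A =====
def ROLLER_LENGTHS : PySem.Dict Int (List Int) :=
  PySem.Dict.ofList [(500, [200]), (650, [250]), (800, [315]), (1000, [380]),
    (1200, [465]), (1400, [530]), (1600, [600]), (1800, [670]), (2000, [750])]

def RETURN_ROLLER_LENGTHS : PySem.Dict Int (List Int) :=
  PySem.Dict.ofList [(500, [600, 250]), (650, [750, 380]), (800, [950, 465]),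
    (1000, [1150, 600]), (1200, [1400, 700]), (1400, [1600, 800]),
    (1600, [1800, 900]), (1800, [2000, 1000]), (2000, [2200, 1100])]

def get_belt_widths_for_length (roller_length : Int) (roller_type : String) : List Int :=
  let lengths_map := if roller_type == "return" then RETURN_ROLLER_LENGTHS else ROLLER_LENGTHS
  lengths_map.items.foldl
    (fun belt_widths p => if roller_length ∈ p.2 then belt_widths ++ [p.1] else belt_widths) []

-- ===== PORT B =====
-- literal reverse lookup tables: length -> belt widths, in A's append order
def REV_CARRYING : PySem.Dict Int (List Int) :=
  PySem.Dict.ofList [(200, [500]), (250, [650]), (315, [800]), (380, [1000]),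
    (465, [1200]), (530, [1400]), (600, [1600]), (670, [1800]), (750, [2000])]

def REV_RETURN : PySem.Dict Int (List Int) :=
  PySem.Dict.ofList [(600, [500, 1000]), (250, [500]), (750, [650]), (380, [650]),
    (950, [800]), (465, [800]), (1150, [1000]), (1400, [1200]), (700, [1200]),
    (1600, [1400]), (800, [1400]), (1800, [1600]), (900, [1600]), (2000, [1800]),
    (1000, [1800]), (2200, [2000]), (1100, [2000])]

def get_belt_widths_for_length_alt (roller_length : Int) (roller_type : String) : List Int :=
  let index := if roller_type == "return" then REV_RETURN else REV_CARRYING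
  index.getD roller_length []

-- ===== PRECONDITION & SPEC =====
def Spec_get_belt_widths_for_length (roller_length : Int) (roller_type : String) (out : List Int) : Prop := out = get_belt_widths_for_length_alt roller_length roller_type
instance (roller_length : Int) (roller_type : String) (out : List Int) : Decidable (Spec_get_belt_widths_for_length roller_length roller_type out) := by unfold Spec_get_belt_widths_for_length; infer_instance

-- ===== CLAIM =====
def Claim_equal_get_belt_widths_for_length : Prop := ∀ (roller_length : Int) (roller_type : String), Dom_get_belt_widths_for_length roller_length roller_type → Spec_get_belt_widths_for_length roller_length roller_type (get_belt_widths_for_length roller_length roller_type)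

-- ===== LEMMAS AND PROOFS =====

set_option maxRecDepth 8000 in
theorem carrying_eq (rl : Int) :
    ROLLER_LENGTHS.items.foldl
      (fun bw p => if rl ∈ p.2 then bw ++ [p.1] else bw) [] = REV_CARRYING.getD rl [] := by
  have hA : ROLLER_LENGTHS.items = [((500 : Int), [200]), ((650 : Int), [250]), ((800 : Int), [315]), ((1000 : Int), [380]), ((1200 : Int), [465]), ((1400 : Int), [530]), ((1600 : Int), [600]), ((1800 : Int), [670]), ((2000 : Int), [750])] := by decide
  have hR : REV_CARRYING = PySem.Dict.mk [((200 : Int), [500]), ((250 : Int), [650]), ((315 : Int), [800]), ((380 : Int), [1000]), ((465 : Int), [1200]), ((530 : Int), [1400]), ((600 : Int), [1600]), ((670 : Int), [1800]), ((750 : Int), [2000])] := by decide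
  by_cases h0 : rl = 200
  · subst h0; decide
  by_cases h1 : rl = 250
  · subst h1; decide
  by_cases h2 : rl = 315
  · subst h2; decide
  by_cases h3 : rl = 380
  · subst h3; decide
  by_cases h4 : rl = 465
  · subst h4; decide
  by_cases h5 : rl = 530
  · subst h5; decide
  by_cases h6 : rl = 600
  · subst h6; decide
  by_cases h7 : rl = 670
  · subst h7; decide
  by_cases h8 : rl = 750
  · subst h8; decide
  rw [hA, hR]
  have b0 : (((200 : Int)) == rl) = false := beq_eq_false_iff_ne.mpr (fun e => h0 e.symm)
  have b1 : (((250 : Int)) == rl) = false := beq_eq_false_iff_ne.mpr (fun e => h1 e.symm)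
  have b2 : (((315 : Int)) == rl) = false := beq_eq_false_iff_ne.mpr (fun e => h2 e.symm)
  have b3 : (((380 : Int)) == rl) = false := beq_eq_false_iff_ne.mpr (fun e => h3 e.symm)
  have b4 : (((465 : Int)) == rl) = false := beq_eq_false_iff_ne.mpr (fun e => h4 e.symm)
  have b5 : (((530 : Int)) == rl) = false := beq_eq_false_iff_ne.mpr (fun e => h5 e.symm)
  have b6 : (((600 : Int)) == rl) = false := beq_eq_false_iff_ne.mpr (fun e => h6 e.symm)
  have b7 : (((670 : Int)) == rl) = false := beq_eq_false_iff_ne.mpr (fun e => h7 e.symm)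
  have b8 : (((750 : Int)) == rl) = false := beq_eq_false_iff_ne.mpr (fun e => h8 e.symm)
  simp [PySem.Dict.getD, PySem.Dict.get?, List.find?, List.foldl,
    h0, h1, h2, h3, h4, h5, h6, h7, h8, b0, b1, b2, b3, b4, b5, b6, b7, b8]

set_option maxRecDepth 8000 in
theorem return_eq (rl : Int) :
    RETURN_ROLLER_LENGTHS.items.foldl
      (fun bw p => if rl ∈ p.2 then bw ++ [p.1] else bw) [] = REV_RETURN.getD rl [] := by
  have hA : RETURN_ROLLER_LENGTHS.items = [((500 : Int), [600, 250]), ((650 : Int), [750, 380]), ((800 : Int), [950, 465]), ((1000 : Int), [1150, 600]), ((1200 : Int), [1400, 700]), ((1400 : Int), [1600, 800]), ((1600 : Int), [1800, 900]), ((1800 : Int), [2000, 1000]), ((2000 : Int), [2200, 1100])] := by decide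
  have hR : REV_RETURN = PySem.Dict.mk [((600 : Int), [500, 1000]), ((250 : Int), [500]), ((750 : Int), [650]), ((380 : Int), [650]), ((950 : Int), [800]), ((465 : Int), [800]), ((1150 : Int), [1000]), ((1400 : Int), [1200]), ((700 : Int), [1200]), ((1600 : Int), [1400]), ((800 : Int), [1400]), ((1800 : Int), [1600]), ((900 : Int), [1600]), ((2000 : Int), [1800]), ((1000 : Int), [1800]), ((2200 : Int), [2000]), ((1100 : Int), [2000])] := by decide
  by_cases h0 : rl = 600
  · subst h0; decide
  by_cases h1 : rl = 250
  · subst h1; decide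
  by_cases h2 : rl = 750
  · subst h2; decide
  by_cases h3 : rl = 380
  · subst h3; decide
  by_cases h4 : rl = 950
  · subst h4; decide
  by_cases h5 : rl = 465
  · subst h5; decide
  by_cases h6 : rl = 1150
  · subst h6; decide
  by_cases h7 : rl = 1400
  · subst h7; decide
  by_cases h8 : rl = 700
  · subst h8; decide
  by_cases h9 : rl = 1600
  · subst h9; decide
  by_cases h10 : rl = 800
  · subst h10; decide
  by_cases h11 : rl = 1800
  · subst h11; decide
  by_cases h12 : rl = 900
  · subst h12; decide
  by_cases h13 : rl = 2000
  · subst h13; decide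
  by_cases h14 : rl = 1000
  · subst h14; decide
  by_cases h15 : rl = 2200
  · subst h15; decide
  by_cases h16 : rl = 1100
  · subst h16; decide
  rw [hA, hR]
  have b0 : (((600 : Int)) == rl) = false := beq_eq_false_iff_ne.mpr (fun e => h0 e.symm)
  have b1 : (((250 : Int)) == rl) = false := beq_eq_false_iff_ne.mpr (fun e => h1 e.symm)
  have b2 : (((750 : Int)) == rl) = false := beq_eq_false_iff_ne.mpr (fun e => h2 e.symm)
  have b3 : (((380 : Int)) == rl) = false := beq_eq_false_iff_ne.mpr (fun e => h3 e.symm)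
  have b4 : (((950 : Int)) == rl) = false := beq_eq_false_iff_ne.mpr (fun e => h4 e.symm)
  have b5 : (((465 : Int)) == rl) = false := beq_eq_false_iff_ne.mpr (fun e => h5 e.symm)
  have b6 : (((1150 : Int)) == rl) = false := beq_eq_false_iff_ne.mpr (fun e => h6 e.symm)
  have b7 : (((1400 : Int)) == rl) = false := beq_eq_false_iff_ne.mpr (fun e => h7 e.symm)
  have b8 : (((700 : Int)) == rl) = false := beq_eq_false_iff_ne.mpr (fun e => h8 e.symm)
  have b9 : (((1600 : Int)) == rl) = false := beq_eq_false_iff_ne.mpr (fun e => h9 e.symm)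
  have b10 : (((800 : Int)) == rl) = false := beq_eq_false_iff_ne.mpr (fun e => h10 e.symm)
  have b11 : (((1800 : Int)) == rl) = false := beq_eq_false_iff_ne.mpr (fun e => h11 e.symm)
  have b12 : (((900 : Int)) == rl) = false := beq_eq_false_iff_ne.mpr (fun e => h12 e.symm)
  have b13 : (((2000 : Int)) == rl) = false := beq_eq_false_iff_ne.mpr (fun e => h13 e.symm)
  have b14 : (((1000 : Int)) == rl) = false := beq_eq_false_iff_ne.mpr (fun e => h14 e.symm)
  have b15 : (((2200 : Int)) == rl) = false := beq_eq_false_iff_ne.mpr (fun e => h15 e.symm)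
  have b16 : (((1100 : Int)) == rl) = false := beq_eq_false_iff_ne.mpr (fun e => h16 e.symm)
  simp [PySem.Dict.getD, PySem.Dict.get?, List.find?, List.foldl,
    h0, h1, h2, h3, h4, h5, h6, h7, h8, h9, h10, h11, h12, h13, h14, h15, h16, b0, b1, b2, b3, b4, b5, b6, b7, b8, b9, b10, b11, b12, b13, b14, b15, b16]

-- ===== VERDICT =====
theorem get_belt_widths_for_length_spec : Claim_equal_get_belt_widths_for_length := by
  intro rl rt _
  unfold Spec_get_belt_widths_for_length get_belt_widths_for_length get_belt_widths_for_length_alt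
  by_cases h : rt == "return" <;> simp only [h, if_pos, Bool.false_eq_true]
  · exact return_eq rl
  · exact carrying_eq rl
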